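-- pv_equiv track=rewrite | github.com/AceBasket/User-space-thread-library | graphs.py | get_nb_args
-- ===== SOURCE A (Python) =====
-- def get_nb_args(name: str):
-- 	nb_args = {
-- 		0: ['01', '02', '03', '11', '12'],
-- 	 	1: ['21', '22', '23', '51'],
-- 		2: ['32', '33']
-- 	}
-- 	for i in range(3):
-- 		if name[:2] in nb_args[i]:
-- 			return i
-- ===== SOURCE B (Python) =====
-- def get_nb_args(name: str):
-- 	p = name[:2]
-- 	if len(p) == 2 and p.isdigit():
-- 		n = 10 * (ord(p[0]) - 48) + (ord(p[1]) - 48)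
-- 		if 1 <= n <= 3 or 11 <= n <= 12:
-- 			return 0
-- 		if 21 <= n <= 23 or n == 51:
-- 			return 1
-- 		if 32 <= n <= 33:
-- 			return 2
-- 	return None
-- ===== Notes on version B (the rewrite author's own statement) =====
-- stated objective: alternative
-- what changed: Replaces A's table of three prefix lists and the loop with per-group membership scans by digit arithmetic: B parses the two leading digit characters into n = 10*d1+d2 and classifies n by numeric range tests (1-3/11-12 -> 0, 21-23/51 -> 1, 32-33 -> 2), with no table and no scan.
import Mathlib
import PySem

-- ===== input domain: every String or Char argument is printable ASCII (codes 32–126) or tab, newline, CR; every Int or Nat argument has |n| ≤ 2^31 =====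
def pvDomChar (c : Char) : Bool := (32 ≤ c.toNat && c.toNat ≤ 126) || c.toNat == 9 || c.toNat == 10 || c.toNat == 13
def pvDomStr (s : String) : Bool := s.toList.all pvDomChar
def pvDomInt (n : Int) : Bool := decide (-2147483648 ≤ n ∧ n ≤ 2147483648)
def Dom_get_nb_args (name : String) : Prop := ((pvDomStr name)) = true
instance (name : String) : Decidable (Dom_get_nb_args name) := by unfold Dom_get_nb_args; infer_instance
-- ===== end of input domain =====

-- B replaces A's table of three prefix lists and the scan over them by arithmetic: it parses the
-- two leading digit characters into the number n = 10*d1+d2 and classifies n by numeric ranges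
-- (1..3, 11..12 → 0; 21..23, 51 → 1; 32..33 → 2); no table, no membership scan (alternative).

-- ===== PORT A =====
-- literal port: dict {0: [...], 1: [...], 2: [...]}, then 'for i in range(3): if name[:2] in nb_args[i]: return i'
def get_nb_args (name : String) : Option Int :=
  let nb_args : PySem.Dict Int (List String) :=
    PySem.Dict.ofList
      [ (0, ["01", "02", "03", "11", "12"]),
        (1, ["21", "22", "23", "51"]),
        (2, ["32", "33"]) ]
  (PySem.List.pyRange 0 3 1).foldl
    (fun acc i =>
      match acc with
      | some r => some r
      | none =>
        if PySem.Str.slice name none (some 2) ∈ nb_args.getD i [] then some i else none)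
    none

-- ===== PORT B =====
-- literal port of Source B: p = name[:2]; if len(p) == 2 and p.isdigit(): n = 10*(ord(p[0])-48)+(ord(p[1])-48); range tests
def get_nb_args_alt (name : String) : Option Int :=
  let p := PySem.Str.slice name none (some 2)
  if PySem.Str.len p == 2 && PySem.Str.strIsdigit p then
    -- p has length 2 here, so p[0] and p[1] cannot raise; the none branches are unreachable guards
    match PySem.Str.pyGet? p 0, PySem.Str.pyGet? p 1 with
    | some a, some b =>
      let n : Int := 10 * ((a.toNat : Int) - 48) + ((b.toNat : Int) - 48)
      if (1 ≤ n ∧ n ≤ 3) ∨ (11 ≤ n ∧ n ≤ 12) then some 0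
      else if (21 ≤ n ∧ n ≤ 23) ∨ n = 51 then some 1
      else if 32 ≤ n ∧ n ≤ 33 then some 2
      else none
    | _, _ => none
  else none

-- ===== PRECONDITION & SPEC =====
def Spec_get_nb_args (name : String) (out : Option Int) : Prop := out = get_nb_args_alt name
instance (name : String) (out : Option Int) : Decidable (Spec_get_nb_args name out) := by unfold Spec_get_nb_args; infer_instance

-- ===== CLAIM (what is proved, stated in full; the proofs are below) =====
def Claim_equal_get_nb_args : Prop := ∀ (name : String), Dom_get_nb_args name → Spec_get_nb_args name (get_nb_args name)

-- ===== LEMMAS AND PROOFS =====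

-- Char is determined by its code point.
theorem pv_char_toNat_inj {c d : Char} (h : c.toNat = d.toNat) : c = d :=
  Char.ext (UInt32.toNat_inj.mp h)

-- An ASCII-digit character is one of the ten digit literals.
theorem pv_digit_mem {c : Char} (h : PySem.Chars.isdigit c = true) :
    c ∈ ['0','1','2','3','4','5','6','7','8','9'] := by
  simp only [PySem.Chars.isdigit, Bool.and_eq_true, decide_eq_true_eq, Char.le_def,
    UInt32.le_iff_toNat_le] at h
  obtain ⟨h1, h2⟩ := h
  have ha : 48 ≤ c.toNat := h1
  have hb : c.toNat ≤ 57 := h2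
  set k := c.toNat with hk
  interval_cases k <;>
    simp only [List.mem_cons, List.not_mem_nil, or_false] <;>
    first
    | exact .inl (pv_char_toNat_inj (by rw [← hk]; decide))
    | exact .inr (.inl (pv_char_toNat_inj (by rw [← hk]; decide)))
    | exact .inr (.inr (.inl (pv_char_toNat_inj (by rw [← hk]; decide))))
    | exact .inr (.inr (.inr (.inl (pv_char_toNat_inj (by rw [← hk]; decide)))))
    | exact .inr (.inr (.inr (.inr (.inl (pv_char_toNat_inj (by rw [← hk]; decide))))))
    | exact .inr (.inr (.inr (.inr (.inr (.inl (pv_char_toNat_inj (by rw [← hk]; decide)))))))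
    | exact .inr (.inr (.inr (.inr (.inr (.inr (.inl (pv_char_toNat_inj (by rw [← hk]; decide))))))))
    | exact .inr (.inr (.inr (.inr (.inr (.inr (.inr (.inl (pv_char_toNat_inj (by rw [← hk]; decide)))))))))
    | exact .inr (.inr (.inr (.inr (.inr (.inr (.inr (.inr (.inl (pv_char_toNat_inj (by rw [← hk]; decide))))))))))
    | exact .inr (.inr (.inr (.inr (.inr (.inr (.inr (.inr (.inr (pv_char_toNat_inj (by rw [← hk]; decide))))))))))

-- Both ports depend on the input only through p := name[:2]; pointwise over p the
-- table scan of A and the digit-arithmetic classification of B agree.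
theorem get_nb_args_key (p : String) :
    (PySem.List.pyRange 0 3 1).foldl
      (fun acc i =>
        match acc with
        | some r => some r
        | none =>
          if p ∈ (PySem.Dict.ofList
              [ ((0 : Int), ["01", "02", "03", "11", "12"]),
                (1, ["21", "22", "23", "51"]),
                (2, ["32", "33"]) ]).getD i [] then some i else none)
      none
    = (if PySem.Str.len p == 2 && PySem.Str.strIsdigit p then
        match PySem.Str.pyGet? p 0, PySem.Str.pyGet? p 1 with
        | some a, some b =>
          let n : Int := 10 * ((a.toNat : Int) - 48) + ((b.toNat : Int) - 48)
          if (1 ≤ n ∧ n ≤ 3) ∨ (11 ≤ n ∧ n ≤ 12) then some 0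
          else if (21 ≤ n ∧ n ≤ 23) ∨ n = 51 then some 1
          else if 32 ≤ n ∧ n ≤ 33 then some 2
          else none
        | _, _ => none
      else (none : Option Int)) := by
  by_cases hd : (PySem.Str.len p == 2 && PySem.Str.strIsdigit p) = true
  · -- p is two digit characters: enumerate them and compute both sides
    obtain ⟨hlen, hdig⟩ := Bool.and_eq_true_iff.mp hd
    have hlen2 : p.toList.length = 2 := by
      have h2 : PySem.Str.len p = 2 := by exact eq_of_beq hlen
      rw [PySem.Str.len_eq] at h2
      exact_mod_cast h2
    obtain ⟨a, b, hab⟩ := List.length_eq_two.mp hlen2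
    rw [PySem.Str.strIsdigit_eq, hab] at hdig
    simp only [PySem.Chars.strIsdigit, List.isEmpty_cons, Bool.not_false, Bool.true_and,
      List.all_cons, List.all_nil, Bool.and_true, Bool.and_eq_true] at hdig
    obtain ⟨hda, hdb⟩ := hdig
    have hp : p = String.ofList [a, b] := by
      have := congrArg String.ofList hab
      rwa [String.ofList_toList] at this
    subst hp
    have hma := pv_digit_mem hda
    have hmb := pv_digit_mem hdb
    fin_cases hma <;> fin_cases hmb <;> decide
  · -- p is not two digit characters: B returns none directly; every member of A's
    -- lists IS two digit characters, so p is in none of them and A returns none too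
    have hne : ∀ m ∈ ["01","02","03","11","12","21","22","23","51","32","33"], p ≠ m := by
      intro m hm h
      subst h
      fin_cases hm <;> exact hd (by decide)
    have h1 := hne "01" (by decide); have h2 := hne "02" (by decide)
    have h3 := hne "03" (by decide); have h4 := hne "11" (by decide)
    have h5 := hne "12" (by decide); have h6 := hne "21" (by decide)
    have h7 := hne "22" (by decide); have h8 := hne "23" (by decide)
    have h9 := hne "51" (by decide); have h10 := hne "32" (by decide)
    have h11 := hne "33" (by decide)
    have hr : PySem.List.pyRange 0 3 1 = [0, 1, 2] := by decide
    have e0 : (PySem.Dict.ofList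
              [ ((0 : Int), ["01", "02", "03", "11", "12"]),
                (1, ["21", "22", "23", "51"]),
                (2, ["32", "33"]) ]).getD 0 [] = ["01", "02", "03", "11", "12"] := by rfl
    have e1 : (PySem.Dict.ofList
              [ ((0 : Int), ["01", "02", "03", "11", "12"]),
                (1, ["21", "22", "23", "51"]),
                (2, ["32", "33"]) ]).getD 1 [] = ["21", "22", "23", "51"] := by rfl
    have e2 : (PySem.Dict.ofList
              [ ((0 : Int), ["01", "02", "03", "11", "12"]),
                (1, ["21", "22", "23", "51"]),
                (2, ["32", "33"]) ]).getD 2 [] = ["32", "33"] := by rfl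
    rw [hr]
    simp only [List.foldl, e0, e1, e2]
    rw [if_neg (by simp [h1, h2, h3, h4, h5]), if_neg (by simp [h6, h7, h8, h9]),
        if_neg (by simp [h10, h11]), if_neg hd]

-- ===== VERDICT (by name: the statement is the Claim_ definition above) =====
set_option maxHeartbeats 1000000 in
theorem get_nb_args_spec : Claim_equal_get_nb_args := by
  intro name _
  unfold Spec_get_nb_args get_nb_args get_nb_args_alt
  exact get_nb_args_key (PySem.Str.slice name none (some 2))
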